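-- pv_equiv track=rewrite | github.com/NXU-Shilab/DINOSNN | DL/utils.py | add_suffix_to_duplicates
-- ===== SOURCE A (Python) =====
-- def add_suffix_to_duplicates(strings):
--     count_dict = {}
--     result = []
--     for s in strings:
--         if s in count_dict:
--             count_dict[s] += 1
--             result.append(f"{s}-{count_dict[s]}")
--         else:
--             count_dict[s] = 1
--             result.append(s)
--     return result
-- ===== SOURCE B (Python) =====
-- def add_suffix_to_duplicates(strings):
--     # Group pass: one scan records, for each distinct string, the indices where it occurs.
--     groups = {}
--     n = 0
--     for i, s in enumerate(strings):
--         groups.setdefault(s, []).append(i)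
--         n += 1
--     # Fill pass: write each group into a preallocated slot list by occurrence number.
--     result = [None] * n
--     for s, idxs in groups.items():
--         for k, i in enumerate(idxs):
--             result[i] = s if k == 0 else f"{s}-{k + 1}"
--     return result
-- ===== Notes on version B (the rewrite author's own statement) =====
-- stated objective: alternative
-- what changed: Replaced A's single pass with a running count-dict by a two-phase group-and-fill algorithm: one pass groups the indices of each distinct string, then a preallocated result list is filled group by group, writing the plain string at a group's first index and s-(k+1) at its k-th later index.
import Mathlib
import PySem

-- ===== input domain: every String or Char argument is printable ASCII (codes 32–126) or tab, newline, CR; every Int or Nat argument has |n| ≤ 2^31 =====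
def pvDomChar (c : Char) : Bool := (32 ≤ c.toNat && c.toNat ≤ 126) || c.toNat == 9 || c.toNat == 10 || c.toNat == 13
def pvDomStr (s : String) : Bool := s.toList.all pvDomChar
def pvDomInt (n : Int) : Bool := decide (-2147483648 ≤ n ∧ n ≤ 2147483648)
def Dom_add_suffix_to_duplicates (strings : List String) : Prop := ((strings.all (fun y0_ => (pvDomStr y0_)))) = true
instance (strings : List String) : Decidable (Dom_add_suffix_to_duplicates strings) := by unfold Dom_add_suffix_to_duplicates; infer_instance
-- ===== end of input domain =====

-- B replaces A's single running-count pass by a two-phase group-and-fill algorithm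
-- (group each string's indices, then fill a preallocated result list group by group).

-- ===== PORT A =====
-- one iteration of A's loop body over the state (count_dict, result)
def pvStepA (st : PySem.Dict String Int × List String) (s : String) :
    PySem.Dict String Int × List String :=
  if st.1.contains s then
    let d := st.1.insert s (st.1.getD s 0 + 1)          -- count_dict[s] += 1
    (d, st.2 ++ [s ++ "-" ++ PySem.Int.toStr (d.getD s 0)])  -- result.append(f"{s}-{count_dict[s]}")
  else
    (st.1.insert s 1, st.2 ++ [s])

def add_suffix_to_duplicates (strings : List String) : List String :=
  (strings.foldl pvStepA (PySem.Dict.empty, [])).2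

-- ===== PORT B =====
-- the value written for occurrence number k of string s: `s if k == 0 else f"{s}-{k+1}"`
def pvMkVal (s : String) (k : Int) : String :=
  if k = 0 then s else s ++ "-" ++ PySem.Int.toStr (k + 1)

def add_suffix_to_duplicates_alt (strings : List String) : List String :=
  -- group pass: for i, s in enumerate(strings): groups.setdefault(s, []).append(i); n += 1
  let st := (PySem.List.enumerate strings 0).foldl
      (fun st q => (st.1.modify q.2 [] (fun l => l ++ [q.1]), st.2 + 1))
      ((PySem.Dict.empty : PySem.Dict String (List Int)), (0 : Int))
  -- result = [None] * n   (n = the loop's count, provably ≥ 0, so .toNat is exact)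
  let r0 : List (Option String) := List.replicate st.2.toNat none
  -- fill pass: for s, idxs in groups.items(): for k, i in enumerate(idxs): result[i] = ...
  -- (each written index i is an enumerate position, provably 0 ≤ i < n, so .toNat is exact)
  let r := st.1.items.foldl
      (fun r g => (PySem.List.enumerate g.2 0).foldl
          (fun r q => r.set q.2.toNat (some (pvMkVal g.1 q.1))) r)
      r0
  r.map (fun o => o.getD "")

-- ===== PRECONDITION & SPEC =====
def Spec_add_suffix_to_duplicates (strings : List String) (out : List String) : Prop := out = add_suffix_to_duplicates_alt strings
instance (strings : List String) (out : List String) : Decidable (Spec_add_suffix_to_duplicates strings out) := by unfold Spec_add_suffix_to_duplicates; infer_instance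

-- ===== CLAIM (what is proved, stated in full; the proofs are below) =====
def Claim_equal_add_suffix_to_duplicates : Prop := ∀ (strings : List String), Dom_add_suffix_to_duplicates strings → Spec_add_suffix_to_duplicates strings (add_suffix_to_duplicates strings)

-- ===== LEMMAS AND PROOFS =====

-- canonical description of the output: position j holds pvMkVal strings[j] (prefix count)
def pvCanon (strings : List String) : List String :=
  (List.range strings.length).map (fun j =>
    pvMkVal (strings.getD j "") (((strings.take j).count (strings.getD j "") : Int)))

-- reference form of A's loop: output for the remaining list l, given the already-processed prefix p
def pvF (p l : List String) : List String :=
  match l with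
  | [] => []
  | s :: l' => pvMkVal s (p.count s : Int) :: pvF (p ++ [s]) l'

lemma pvStepA_counter (p : List String) (res : List String) (s : String) :
    pvStepA (PySem.Dict.counter p, res) s =
      (PySem.Dict.counter (p ++ [s]), res ++ [pvMkVal s (p.count s : Int)]) := by
  unfold pvStepA pvMkVal
  rw [PySem.Dict.counter_append_singleton]
  by_cases hmem : s ∈ p
  · have hc : (PySem.Dict.counter p).contains s = true := by
      rw [PySem.Dict.contains_counter]; exact List.elem_eq_true_of_mem hmem
    have hcnt : ¬ ((p.count s : Int) = 0) := by
      have := List.count_pos_iff.mpr hmem; omega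
    simp only [hc, if_true, if_neg hcnt, Prod.mk.injEq,
               PySem.Dict.getD_insert_self, PySem.Dict.getD_counter]
    exact ⟨by rw [← PySem.Dict.getD_counter p s]; rfl, trivial⟩
  · have hc : (PySem.Dict.counter p).contains s = false := by
      rw [PySem.Dict.contains_counter]
      exact (Bool.not_eq_true _).mp (fun h => hmem (List.mem_of_elem_eq_true h))
    have hcnt : p.count s = 0 := List.count_eq_zero.mpr hmem
    simp only [hc, Bool.false_eq_true, if_false, hcnt, Nat.cast_zero,
               Prod.mk.injEq]
    rw [show (PySem.Dict.counter p).modify s 0 (fun x => x + 1)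
          = (PySem.Dict.counter p).insert s ((PySem.Dict.counter p).getD s 0 + 1) from rfl,
        PySem.Dict.getD_counter, hcnt]
    norm_num

lemma pvA_loop (l p res : List String) :
    l.foldl pvStepA (PySem.Dict.counter p, res) = (PySem.Dict.counter (p ++ l), res ++ pvF p l) := by
  induction l generalizing p res with
  | nil => simp [pvF]
  | cons s l' ih =>
      rw [List.foldl_cons, pvStepA_counter, ih]
      simp [pvF, List.append_assoc]

-- pvF as an index map: the j-th output only depends on the count of l[j] in the processed prefix
lemma pvF_eq_map (l p : List String) :
    pvF p l = (List.range l.length).map (fun j =>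
      pvMkVal (l.getD j "") (((p ++ l.take j).count (l.getD j "") : Int))) := by
  induction l generalizing p with
  | nil => simp [pvF]
  | cons s l' ih =>
      rw [pvF, List.length_cons, List.range_succ_eq_map, List.map_cons, List.map_map]
      congr 1
      · simp
      · rw [ih (p ++ [s])]
        apply List.map_congr_left
        intro j hj
        simp [List.append_assoc]

theorem pvA_eq_canon (strings : List String) :
    add_suffix_to_duplicates strings = pvCanon strings := by
  unfold add_suffix_to_duplicates pvCanon
  rw [show (PySem.Dict.empty : PySem.Dict String Int) = PySem.Dict.counter [] from rfl,
      pvA_loop strings [] []]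
  simp [pvF_eq_map]

-- ---- B-side proof notions ----
-- the (Nat) positions of s in l
def pvPos (l : List String) (s : String) : List Nat :=
  (List.range l.length).filter (fun j => l.getD j "" == s)

-- the (index, value) writes performed for one group
def pvAsgn (g : String × List Int) : List (Nat × String) :=
  (PySem.List.enumerate g.2 0).map (fun q => (q.2.toNat, pvMkVal g.1 q.1))

-- a sequence of writes into the slot list
def pvFill (ps : List (Nat × String)) (r : List (Option String)) : List (Option String) :=
  ps.foldl (fun r p => r.set p.1 (some p.2)) r

lemma pvPos_cons (x : String) (l : List String) (s : String) :
    pvPos (x :: l) s = (if x == s then [0] else []) ++ (pvPos l s).map Nat.succ := by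
  unfold pvPos
  rw [List.length_cons, List.range_succ_eq_map, List.filter_cons]
  by_cases hx : (x == s) <;>
    simp [hx, List.filter_map, Function.comp_def]

lemma pvPos_mem {l : List String} {s : String} {j : Nat} :
    j ∈ pvPos l s ↔ j < l.length ∧ l.getD j "" = s := by
  simp [pvPos]

lemma pvPos_nodup (l : List String) (s : String) : (pvPos l s).Nodup :=
  List.Nodup.filter _ List.nodup_range

lemma pvPos_getElem? {l : List String} {s : String} {j : Nat}
    (h : j < l.length) (hs : l.getD j "" = s) :
    (pvPos l s)[(l.take j).count s]? = some j := by
  induction l generalizing j with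
  | nil => simp at h
  | cons x l' ih =>
      rw [pvPos_cons]
      cases j with
      | zero =>
          have hx : x = s := by simpa using hs
          simp [hx]
      | succ j' =>
          have h' : j' < l'.length := by simpa using h
          have hs' : l'.getD j' "" = s := by simpa [List.getD_cons_succ] using hs
          have hih := ih h' hs'
          rw [List.take_succ_cons]
          by_cases hx : x = s
          · simp [hx, List.count_cons_self, List.getElem?_map, hih]
          · simp [List.count_cons_of_ne (by simpa using hx), hx, List.getElem?_map, hih]

lemma pvFill_length (ps : List (Nat × String)) (r : List (Option String)) :
    (pvFill ps r).length = r.length := by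
  induction ps generalizing r with
  | nil => rfl
  | cons p ps ih =>
      rw [show pvFill (p :: ps) r = pvFill ps (r.set p.1 (some p.2)) from rfl, ih,
          List.length_set]

lemma pvFill_getElem?_of_ne {ps : List (Nat × String)} {j : Nat}
    (r : List (Option String)) (h : ∀ p ∈ ps, p.1 ≠ j) :
    (pvFill ps r)[j]? = r[j]? := by
  induction ps generalizing r with
  | nil => rfl
  | cons p ps ih =>
      rw [show pvFill (p :: ps) r = pvFill ps (r.set p.1 (some p.2)) from rfl,
          ih _ (fun q hq => h q (List.mem_cons_of_mem _ hq)),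
          List.getElem?_set_ne (h p List.mem_cons_self)]

lemma pvFill_append (ps₁ ps₂ : List (Nat × String)) (r : List (Option String)) :
    pvFill (ps₁ ++ ps₂) r = pvFill ps₂ (pvFill ps₁ r) :=
  List.foldl_append

lemma pvFill_hit {ps₂ : List (Nat × String)} {j : Nat} (ps₁ : List (Nat × String))
    (v : String) (r : List (Option String)) (hj : j < r.length)
    (h2 : ∀ p ∈ ps₂, p.1 ≠ j) :
    (pvFill (ps₁ ++ (j, v) :: ps₂) r)[j]? = some (some v) := by
  rw [pvFill_append,
      show pvFill ((j, v) :: ps₂) (pvFill ps₁ r)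
        = pvFill ps₂ ((pvFill ps₁ r).set j (some v)) from rfl,
      pvFill_getElem?_of_ne _ h2,
      List.getElem?_set_self (by rw [pvFill_length]; exact hj)]

lemma pvEnumFilter (l : List String) (a : Int) (s : String) :
    ((PySem.List.enumerate l a).filter (fun q => q.2 == s)).map (fun q => q.1)
      = (pvPos l s).map (fun (j : Nat) => a + (j : Int)) := by
  induction l generalizing a with
  | nil => simp [PySem.List.enumerate_nil, pvPos]
  | cons x l' ih =>
      rw [PySem.List.enumerate_cons, pvPos_cons, List.filter_cons]
      by_cases hx : (x == s) <;>
        simp only [hx, if_true, Bool.false_eq_true, if_false, List.map_cons,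
          List.map_map, List.nil_append, List.cons_append, ih (a + 1)]
      · exact congrArg₂ _ (by simp) (List.map_congr_left
          (fun i _ => by simp; ring))
      · exact List.map_congr_left (fun i _ => by simp; ring)

lemma pvGroups_getD (strings : List String) (s : String) :
    ((PySem.List.enumerate strings 0).foldl
        (fun d q => d.modify q.2 [] (fun l => l ++ [q.1]))
        (PySem.Dict.empty : PySem.Dict String (List Int))).getD s []
      = (pvPos strings s).map (fun (j : Nat) => (j : Int)) := by
  have hswap : (PySem.List.enumerate strings 0).foldl
      (fun d q => d.modify q.2 [] (fun l => l ++ [q.1]))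
      (PySem.Dict.empty : PySem.Dict String (List Int))
      = ((PySem.List.enumerate strings 0).map Prod.swap).foldl
          (fun d p => d.modify p.1 [] (fun l => l ++ [p.2])) PySem.Dict.empty := by
    rw [List.foldl_map]; rfl
  rw [hswap, PySem.Dict.getD_foldl_modify_append, PySem.Dict.getD_empty,
      List.nil_append, List.filter_map, List.map_map]
  have : ((PySem.List.enumerate strings 0).filter (fun q => q.2 == s)).map (fun q => q.1)
      = (pvPos strings s).map (fun (j : Nat) => (0 : Int) + (j : Int)) := pvEnumFilter strings 0 s
  simpa [Function.comp_def] using this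

lemma pvGroups_keys (strings : List String) :
    ((PySem.List.enumerate strings 0).foldl
        (fun d q => d.modify q.2 [] (fun l => l ++ [q.1]))
        (PySem.Dict.empty : PySem.Dict String (List Int))).keys
      = PySem.Set.ofList strings := by
  rw [PySem.Dict.keys_foldl_modify_key]
  rw [PySem.List.map_snd_enumerate, PySem.Dict.keys_empty]
  rfl

lemma pvGroups_nodup_keys (strings : List String) :
    ((PySem.List.enumerate strings 0).foldl
        (fun d q => d.modify q.2 [] (fun l => l ++ [q.1]))
        (PySem.Dict.empty : PySem.Dict String (List Int))).keys.Nodup := by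
  rw [pvGroups_keys]; exact PySem.Set.nodup_ofList strings

lemma pvGroups_items (strings : List String) :
    ((PySem.List.enumerate strings 0).foldl
        (fun d q => d.modify q.2 [] (fun l => l ++ [q.1]))
        (PySem.Dict.empty : PySem.Dict String (List Int))).items
      = (PySem.Set.ofList strings).map
          (fun s => (s, (pvPos strings s).map (fun (j : Nat) => (j : Int)))) := by
  rw [PySem.Dict.items_eq_map_keys _ (pvGroups_nodup_keys strings) ([] : List Int),
      pvGroups_keys]
  exact List.map_congr_left (fun s _ => by rw [pvGroups_getD])

lemma pvInner (g : String × List Int) (r : List (Option String)) :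
    (PySem.List.enumerate g.2 0).foldl
        (fun r q => r.set q.2.toNat (some (pvMkVal g.1 q.1))) r
      = pvFill (pvAsgn g) r := by
  rw [pvFill, pvAsgn, List.foldl_map]

lemma pvOuter (gs : List (String × List Int)) (r : List (Option String)) :
    gs.foldl (fun r g => pvFill (pvAsgn g) r) r = pvFill (gs.flatMap pvAsgn) r := by
  induction gs generalizing r with
  | nil => rfl
  | cons g gs ih => rw [List.foldl_cons, List.flatMap_cons, pvFill_append, ih]

lemma pvCount_eq_length {α : Type} (E : List α) :
    E.foldl (fun (n : Int) _ => n + 1) 0 = (E.length : Int) := by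
  rw [PySem.List.foldl_add (g := fun _ => (1 : Int))]
  simp

-- the heart of the B proof: slot j ends up holding its occurrence-numbered value
lemma pvFill_main (strings : List String) {j : Nat} (hj : j < strings.length) :
    (pvFill ((PySem.Set.ofList strings).flatMap
          (fun s => pvAsgn (s, (pvPos strings s).map (fun (i : Nat) => (i : Int)))))
        (List.replicate strings.length none))[j]?
      = some (some (pvMkVal (strings.getD j "")
          (((strings.take j).count (strings.getD j "") : Int)))) := by
  set s := strings.getD j "" with hs
  set c := (strings.take j).count s with hc
  have hsK : s ∈ PySem.Set.ofList strings := by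
    rw [PySem.Set.mem_ofList, hs, List.getD_eq_getElem strings "" hj]
    exact List.getElem_mem hj
  obtain ⟨K₁, K₂, hK⟩ := List.mem_iff_append.mp hsK
  have hKnd : (PySem.Set.ofList strings).Nodup := PySem.Set.nodup_ofList strings
  have hsK₂ : s ∉ K₂ := by
    rw [hK] at hKnd
    exact (List.nodup_cons.mp (List.Nodup.of_append_right hKnd)).1
  set P := pvPos strings s with hP
  have hPc : P[c]? = some j := pvPos_getElem? hj hs.symm
  obtain ⟨hclen, hPj⟩ := List.getElem?_eq_some_iff.mp hPc
  have hPsplit : P = P.take c ++ j :: P.drop (c + 1) := by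
    rw [← hPj, List.getElem_cons_drop, List.take_append_drop]
  have hjdrop : j ∉ P.drop (c + 1) := by
    have := pvPos_nodup strings s
    rw [← hP, hPsplit] at this
    exact (List.nodup_cons.mp (List.Nodup.of_append_right this)).1
  rw [hK, List.flatMap_append, List.flatMap_cons]
  have hasgn : pvAsgn (s, P.map (fun (i : Nat) => (i : Int)))
      = ((PySem.List.enumerate ((P.take c).map (fun (i : Nat) => (i : Int))) 0).map
            (fun q => (q.2.toNat, pvMkVal s q.1)))
        ++ (j, pvMkVal s (c : Int))
          :: ((PySem.List.enumerate ((P.drop (c + 1)).map (fun (i : Nat) => (i : Int)))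
                ((c : Int) + 1)).map (fun q => (q.2.toNat, pvMkVal s q.1))) := by
    conv_lhs => rw [hPsplit]
    rw [pvAsgn]
    simp only [List.map_append, List.map_cons, PySem.List.enumerate_append,
      PySem.List.enumerate_cons, List.map_append, List.map_cons, List.length_map,
      List.length_take, Nat.min_eq_left (le_of_lt hclen)]
    simp
  rw [hasgn]
  rw [show ∀ (A B : List (Nat × String)) (x : Nat × String) (C D : List (Nat × String)),
        A ++ ((B ++ x :: C) ++ D) = (A ++ B) ++ x :: (C ++ D) from
      fun A B x C D => by simp [List.append_assoc]]
  refine pvFill_hit _ _ _ (by simpa using hj) ?_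
  intro p hp
  rcases List.mem_append.mp hp with hp | hp
  · obtain ⟨q, hq, rfl⟩ := List.mem_map.mp hp
    obtain ⟨k, hk, rfl⟩ := (PySem.List.mem_enumerate_iff _ _ _).mp hq
    simp only
    have : ((P.drop (c + 1)).map (fun (i : Nat) => (i : Int)))[k] ∈ (P.drop (c + 1)).map (fun (i : Nat) => (i : Int)) :=
      List.getElem_mem hk
    obtain ⟨i, hi, hie⟩ := List.mem_map.mp this
    rw [← hie]
    simp only [Int.toNat_natCast]
    exact fun h => hjdrop (h ▸ hi)
  · obtain ⟨s', hs', hp⟩ := List.mem_flatMap.mp hp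
    obtain ⟨q, hq, rfl⟩ := List.mem_map.mp hp
    obtain ⟨k, hk, rfl⟩ := (PySem.List.mem_enumerate_iff _ _ _).mp hq
    simp only
    have : ((pvPos strings s').map (fun (i : Nat) => (i : Int)))[k] ∈ (pvPos strings s').map (fun (i : Nat) => (i : Int)) :=
      List.getElem_mem hk
    obtain ⟨i, hi, hie⟩ := List.mem_map.mp this
    rw [← hie]
    have hval : strings.getD i "" = s' := (pvPos_mem.mp hi).2
    have hne : i ≠ j := by
      intro h
      have hss : s' = s := by rw [← hval, h, hs]
      exact hsK₂ (hss ▸ hs')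
    simp only [Int.toNat_natCast]
    exact hne

theorem pvB_eq_canon (strings : List String) :
    add_suffix_to_duplicates_alt strings = pvCanon strings := by
  simp only [add_suffix_to_duplicates_alt]
  rw [PySem.List.foldl_prod_mk
      (f := fun (d : PySem.Dict String (List Int)) (q : Int × String) =>
        d.modify q.2 [] (fun l => l ++ [q.1]))
      (g := fun (n : Int) (_ : Int × String) => n + 1)]
  simp only [pvCount_eq_length, PySem.List.length_enumerate, Int.toNat_natCast]
  simp only [pvInner]
  rw [pvOuter, pvGroups_items, List.flatMap_map]
  apply List.ext_getElem?
  intro j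
  by_cases hj : j < strings.length
  · rw [List.getElem?_map, pvFill_main strings hj]
    simp [pvCanon, hj]
  · rw [List.getElem?_eq_none, List.getElem?_eq_none]
    · simp [pvCanon]; omega
    · rw [List.length_map, pvFill_length, List.length_replicate]; omega

-- ===== VERDICT (by name: the statement is the Claim_ definition above) =====
theorem add_suffix_to_duplicates_spec : Claim_equal_add_suffix_to_duplicates := by
  intro strings _
  unfold Spec_add_suffix_to_duplicates
  rw [pvA_eq_canon, pvB_eq_canon]
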